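-- pv_equiv track=rewrite | github.com/pedromonteiro01/AA | project1/utils.py | show_incidence_matrix
-- ===== SOURCE A (Python) =====
-- def show_incidence_matrix(vertexes, edges):
--     inc_matrix = [[0 for _ in range(len(edges))]for _ in range(len(vertexes))] # start matrix with 0's
--     v_list = [v[0] for v in vertexes] # [v1, v2, v3, v4, ...]
--
--     for i, e in enumerate(edges):
--         x = v_list.index(e[0]) # get index of vertex 1
--         y = v_list.index(e[1]) # get index of vertex 2
--         inc_matrix[x][i] = 1 # change matrix from 0 to 1
--         inc_matrix[y][i] = 1 # change matrix from 0 to 1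
--
--     return inc_matrix
-- ===== SOURCE B (Python) =====
-- def show_incidence_matrix(vertexes, edges):
--     v_list = [v[0] for v in vertexes]
--     edge_idx = [(v_list.index(e[0]), v_list.index(e[1])) for e in edges]
--     return [[1 if r == p[0] or r == p[1] else 0 for p in edge_idx]
--             for r in range(len(vertexes))]
-- ===== Notes on version B (the rewrite author's own statement) =====
-- stated objective: alternative
-- what changed: A preallocates a zero matrix and scatters 1s edge-by-edge into the endpoint rows; B precomputes one endpoint-index table for the edges and then gathers each row directly by comparing row index with the table entries (vertex-major instead of edge-major, no in-place writes).
-- outside the precondition, e.g. on show_incidence_matrix([(1, 7)], [(1, 2)]): A raises ValueError, B raises ValueError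
import Mathlib
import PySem

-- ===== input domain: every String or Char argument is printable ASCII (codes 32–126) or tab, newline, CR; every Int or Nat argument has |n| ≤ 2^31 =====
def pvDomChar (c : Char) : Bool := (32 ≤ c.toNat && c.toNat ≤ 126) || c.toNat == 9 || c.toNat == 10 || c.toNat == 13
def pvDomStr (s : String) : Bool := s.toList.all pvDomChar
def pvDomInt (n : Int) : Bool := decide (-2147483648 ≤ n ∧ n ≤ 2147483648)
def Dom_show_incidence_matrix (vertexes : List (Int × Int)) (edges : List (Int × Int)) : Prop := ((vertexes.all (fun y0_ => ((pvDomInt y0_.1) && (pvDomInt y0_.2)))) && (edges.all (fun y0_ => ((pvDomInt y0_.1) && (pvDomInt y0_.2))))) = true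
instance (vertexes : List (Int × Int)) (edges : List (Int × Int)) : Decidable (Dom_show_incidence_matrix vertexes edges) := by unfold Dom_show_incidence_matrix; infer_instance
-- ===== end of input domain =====

-- ===== PORT A =====
-- B differs from A by decomposition: A scatters 1s edge-by-edge into a preallocated
-- zero matrix; B precomputes an endpoint-index table and gathers each row directly.
-- Port of A: zero matrix, then for each enumerated edge write 1 at both endpoint rows.
-- (On an edge endpoint missing from v_list Python raises ValueError -> excluded by Pre_;
--  the `| _, _ => m` branch is never reached inside Pre_.)
def show_incidence_matrix (vertexes : List (Int × Int)) (edges : List (Int × Int)) : List (List Int) :=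
  let inc0 : List (List Int) := vertexes.map (fun _ => edges.map (fun _ => (0 : Int)))
  let v_list : List Int := vertexes.map (fun v => v.1)
  (PySem.List.enumerate edges 0).foldl (fun m ie =>
    match PySem.List.index? v_list ie.2.1, PySem.List.index? v_list ie.2.2 with
    | some x, some y =>
        -- inc_matrix[x][i] = 1 ; inc_matrix[y][i] = 1  (i = ie.1 ≥ 0 from enumerate)
        (m.modify x (fun row => row.set ie.1.toNat 1)).modify y (fun row => row.set ie.1.toNat 1)
    | _, _ => m) inc0

-- ===== PORT B =====
-- Port of B: index table for the edge endpoints, then each row gathered by comparing indices.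
def show_incidence_matrix_alt (vertexes : List (Int × Int)) (edges : List (Int × Int)) : List (List Int) :=
  let v_list : List Int := vertexes.map (fun v => v.1)
  let edge_idx : List (Option Nat × Option Nat) :=
    edges.map (fun e => (PySem.List.index? v_list e.1, PySem.List.index? v_list e.2))
  (List.range vertexes.length).map (fun r =>
    edge_idx.map (fun p => if p.1 = some r ∨ p.2 = some r then (1 : Int) else 0))

-- ===== PRECONDITION & SPEC =====
-- Pre_: every edge endpoint occurs among the first components of vertexes; on the
-- excluded inputs both Pythons raise ValueError (v_list.index on a missing value).
def Pre_show_incidence_matrix (vertexes : List (Int × Int)) (edges : List (Int × Int)) : Prop :=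
  ∀ e ∈ edges, e.1 ∈ vertexes.map (fun v => v.1) ∧ e.2 ∈ vertexes.map (fun v => v.1)
instance (vertexes : List (Int × Int)) (edges : List (Int × Int)) : Decidable (Pre_show_incidence_matrix vertexes edges) := by unfold Pre_show_incidence_matrix; infer_instance

def pvWitness_show_incidence_matrix : (List (Int × Int)) × (List (Int × Int)) :=
  ([(1, 7), (2, 7), (3, 7)], [(1, 2), (2, 3), (1, 3)])

def Spec_show_incidence_matrix (vertexes : List (Int × Int)) (edges : List (Int × Int)) (out : List (List Int)) : Prop := out = show_incidence_matrix_alt vertexes edges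
instance (vertexes : List (Int × Int)) (edges : List (Int × Int)) (out : List (List Int)) : Decidable (Spec_show_incidence_matrix vertexes edges out) := by unfold Spec_show_incidence_matrix; infer_instance

-- ===== CLAIM (what is proved, stated in full; the proofs are below) =====
def Claim_equal_show_incidence_matrix : Prop := ∀ (vertexes : List (Int × Int)) (edges : List (Int × Int)), Dom_show_incidence_matrix vertexes edges → Pre_show_incidence_matrix vertexes edges → Spec_show_incidence_matrix vertexes edges (show_incidence_matrix vertexes edges)

-- ===== LEMMAS AND PROOFS =====

-- per-row effect of one A-step, used to project A's fold to a single row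
def pvRowStep (v_list : List Int) (r : Nat) (row : List Int) (ie : Int × (Int × Int)) : List Int :=
  match PySem.List.index? v_list ie.2.1, PySem.List.index? v_list ie.2.2 with
  | some x, some y => if x = r ∨ y = r then row.set ie.1.toNat 1 else row
  | _, _ => row

-- projecting A's matrix fold at row r gives a fold of pvRowStep on that row
theorem pvProj (v_list : List Int) (l : List (Int × (Int × Int))) (m : List (List Int)) (r : Nat) :
    (l.foldl (fun m ie =>
      match PySem.List.index? v_list ie.2.1, PySem.List.index? v_list ie.2.2 with
      | some x, some y =>
          (m.modify x (fun row => row.set ie.1.toNat 1)).modify y (fun row => row.set ie.1.toNat 1)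
      | _, _ => m) m)[r]? = m[r]?.map (fun row => l.foldl (pvRowStep v_list r) row) := by
  induction l generalizing m with
  | nil => cases hm : m[r]? <;> simp [hm]
  | cons ie l ih =>
    rw [List.foldl_cons, ih]
    have hone : (match PySem.List.index? v_list ie.2.1, PySem.List.index? v_list ie.2.2 with
        | some x, some y =>
            (m.modify x (fun row => row.set ie.1.toNat 1)).modify y (fun row => row.set ie.1.toNat 1)
        | _, _ => m)[r]? = m[r]?.map (fun row => pvRowStep v_list r row ie) := by
      unfold pvRowStep
      rcases hx : PySem.List.index? v_list ie.2.1 with _ | x <;>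
        rcases hy : PySem.List.index? v_list ie.2.2 with _ | y <;>
        simp only
      · cases m[r]? <;> simp
      · cases m[r]? <;> simp
      · cases m[r]? <;> simp
      · cases hm : m[r]? with
        | none => simp [List.getElem?_modify, hm]
        | some row =>
          by_cases hxr : x = r <;> by_cases hyr : y = r <;>
            simp [hm, hxr, hyr, List.set_set]
    rw [hone]
    cases m[r]? <;> simp

-- pointwise description of the per-row fold over enumerate (inside Pre_: all endpoints found)
theorem pvRowFold (v_list : List Int) (es : List (Int × Int)) (r k : Nat) (row : List Int)
    (hlen : row.length = k + es.length)
    (hpre : ∀ e ∈ es, (PySem.List.index? v_list e.1).isSome ∧ (PySem.List.index? v_list e.2).isSome)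
    (c : Nat) :
    ((PySem.List.enumerate es (k : Int)).foldl (pvRowStep v_list r) row)[c]? =
      if h : k ≤ c ∧ c < row.length then
        (if PySem.List.index? v_list ((es[c - k]'(by omega)).1) = some r ∨
            PySem.List.index? v_list ((es[c - k]'(by omega)).2) = some r
         then some 1 else row[c]?)
      else row[c]? := by
  induction es generalizing k row c with
  | nil => simp only [List.length_nil] at hlen; rw [dif_neg (by omega)]; simp [PySem.List.enumerate]
  | cons e es ih =>
    obtain ⟨hx', hy'⟩ := hpre e (List.mem_cons_self ..)
    obtain ⟨x, hx⟩ := Option.isSome_iff_exists.mp hx'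
    obtain ⟨y, hy⟩ := Option.isSome_iff_exists.mp hy'
    simp only [List.length_cons] at hlen
    rw [PySem.List.enumerate_cons, List.foldl_cons]
    have hstep : ∀ c', (pvRowStep v_list r row ((k : Int), e))[c']? =
        if c' = k ∧ (x = r ∨ y = r) then some 1 else row[c']? := by
      intro c'
      unfold pvRowStep
      rw [hx, hy]
      simp only
      by_cases hxy : x = r ∨ y = r
      · rw [if_pos hxy, List.getElem?_set, show ((k : Int)).toNat = k by omega]
        by_cases hck : c' = k
        · subst hck
          simp [hxy, show c' < row.length by omega]
        · rw [if_neg (Ne.symm hck), if_neg (by tauto)]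
      · rw [if_neg hxy, if_neg (by tauto)]
    have hlen' : (pvRowStep v_list r row ((k : Int), e)).length = (k + 1) + es.length := by
      unfold pvRowStep
      rw [hx, hy]
      simp only
      split
      · rw [List.length_set]; omega
      · omega
    have hk1 : ((k : Int)) + 1 = ((k + 1 : Nat) : Int) := by push_cast; ring
    rw [hk1, ih (k + 1) _ hlen' (fun e' he' => hpre e' (List.mem_cons_of_mem _ he')) c]
    by_cases h1 : k + 1 ≤ c ∧ c < (pvRowStep v_list r row ((k : Int), e)).length
    · rw [dif_pos h1, dif_pos (by omega)]
      rw [hlen'] at h1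
      have hgc : c - k = (c - (k + 1)) + 1 := by omega
      have hidx : ((e :: es)[c - k]'(by simp only [List.length_cons]; omega)) =
          (es[c - (k + 1)]'(by omega)) := by
        simp [hgc]
      rw [hidx]
      split
      · rfl
      · rw [hstep c, if_neg (by omega)]
    · rw [hlen'] at h1
      rw [dif_neg (by omega), hstep c]
      by_cases hck : c = k
      · subst hck
        rw [dif_pos (by omega)]
        simp only [Nat.sub_self, List.getElem_cons_zero, hx, hy, Option.some.injEq]
        by_cases hhit : x = r ∨ y = r
        · rw [if_pos (by simp [hhit]), if_pos hhit]
        · rw [if_neg (by simp [hhit]), if_neg hhit]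
      · rw [if_neg (by tauto), dif_neg (by omega)]

-- the whole equivalence, entrywise
theorem pvMain (vertexes edges : List (Int × Int))
    (hpre : Pre_show_incidence_matrix vertexes edges) :
    show_incidence_matrix vertexes edges = show_incidence_matrix_alt vertexes edges := by
  have hpre' : ∀ e ∈ edges, (PySem.List.index? (vertexes.map (fun v => v.1)) e.1).isSome ∧
      (PySem.List.index? (vertexes.map (fun v => v.1)) e.2).isSome := by
    intro e he
    obtain ⟨h1, h2⟩ := hpre e he
    rw [PySem.List.index?_eq_idxOf?, PySem.List.index?_eq_idxOf?]
    exact ⟨List.isSome_idxOf?.mpr h1, List.isSome_idxOf?.mpr h2⟩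
  unfold show_incidence_matrix show_incidence_matrix_alt
  simp only
  apply List.ext_getElem?
  intro r
  rw [pvProj]
  rcases Nat.lt_or_ge r vertexes.length with hr | hr
  · rw [List.getElem?_map, List.getElem?_map]
    rw [List.getElem?_range hr, show vertexes[r]? = some (vertexes[r]'hr) from List.getElem?_eq_getElem hr]
    simp only [Option.map_some]
    congr 1
    apply List.ext_getElem?
    intro c
    have hrow := pvRowFold (vertexes.map (fun v => v.1)) edges r 0
      (edges.map (fun _ => (0 : Int))) (by simp) hpre' c
    rw [Nat.cast_zero] at hrow
    rw [hrow]
    simp only [Nat.zero_le, true_and, Nat.sub_zero, List.length_map, List.getElem?_map]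
    rcases Nat.lt_or_ge c edges.length with hc | hc
    · rw [dif_pos hc]
      rw [show edges[c]? = some (edges[c]'hc) from List.getElem?_eq_getElem hc]
      simp only [Option.map_some]
      split <;> rfl
    · rw [dif_neg (by omega)]
      rw [show edges[c]? = none from List.getElem?_eq_none hc]
      simp
  · rw [List.getElem?_map, List.getElem?_map]
    rw [show vertexes[r]? = none from List.getElem?_eq_none hr,
      show (List.range vertexes.length)[r]? = none from List.getElem?_eq_none (by simpa using hr)]
    simp

-- ===== VERDICT (by name: the statement is the Claim_ definition above) =====
theorem show_incidence_matrix_spec : Claim_equal_show_incidence_matrix := by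
  intro vertexes edges _ hpre
  exact pvMain vertexes edges hpre
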